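-- pv_equiv track=rewrite | github.com/seongun1/baekjoon | 프로그래머스/2/389480. 완전범죄/완전범죄.py | solution
-- ===== SOURCE A (Python) =====
-- def solution(info, n, m):
--     # info: list of (a_i, b_i)
--     INF = 10**12
--
--     total_b = sum(b for _, b in info)
--     B = total_b
--
--     # 필요량 계산: sum_selected_b > need  <=> need = total_b - m
--     need = total_b - m
--
--     # 빠른 처리: 이미 total_b < m 이라면 b 조건은 만족
--     if need < 0:
--         # 아무것도 훔치지 않아도 b_remaining < m 이므로 a = 0 이 가능하면 0 반환
--         return 0 if 0 < n else -1
--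
--     # dp[w] = 최소 a 합으로 정확히 w의 b 를 얻음
--     dp = [INF] * (B + 1)
--     dp[0] = 0
--
--     for a_i, b_i in info:
--         # 뒤에서부터 갱신 (0/1 knapsack)
--         # 범위를 B..0으로 두면 모든 w에 대해 검사 가능
--         for w in range(B, -1, -1):
--             if dp[w] == INF:
--                 continue
--             nw = w + b_i
--             if nw > B:
--                 nw = B
--             if dp[nw] > dp[w] + a_i:
--                 dp[nw] = dp[w] + a_i
--
--     # 이제 w >= need+1 (정수 엄격 부등호 때문에) 중 dp[w]가 최소인 값을 찾음
--     target = need + 1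
--     if target > B:
--         # 필요량이 B 초과면 불가능
--         return -1
--
--     ans = INF
--     for w in range(target, B + 1):
--         if dp[w] < ans and dp[w] < n:  # a < n 조건도 만족해야 함
--             ans = dp[w]
--
--     return ans if ans != INF else -1
-- ===== SOURCE B (Python) =====
-- def solution(info, n, m):
--     # Dual knapsack: DP keyed by a-cost (only costs < n are kept), value = the
--     # maximum b-sum achievable at exactly that cost; answer = smallest stored
--     # cost whose max b-sum exceeds need = total_b - m.
--     need = sum(b for _, b in info) - m
--     best = {0: 0}  # a-cost -> max b-sum of a subset with exactly that cost
--     for a, b in info: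
--         for c, w in list(best.items()):
--             nc = c + a
--             if nc < n and (nc not in best or best[nc] < w + b):
--                 best[nc] = w + b
--     cands = [c for c, w in best.items() if w > need and c < n]
--     return min(cands) if cands else -1
-- ===== Notes on version B (the rewrite author's own statement) =====
-- stated objective: alternative
-- what changed: Replaces A's weight-indexed knapsack (dense 0..total_b array of min a-costs, backward in-place passes, INF sentinel, three special-cased returns) by the dual cost-keyed DP: a dict from a-cost (pruned to < n) to the maximum b-sum achievable at exactly that cost, with one uniform final min over the qualifying costs.
-- outside the precondition, e.g. on solution([(-1, 0)], 5, 1): A returns 0, B returns -1; on solution([(1, -1), (0, 3)], 5, 0): A returns -1, B returns 0; on solution([(0, -1)], 5, -2): A raises IndexError, B returns -1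
import Mathlib
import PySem

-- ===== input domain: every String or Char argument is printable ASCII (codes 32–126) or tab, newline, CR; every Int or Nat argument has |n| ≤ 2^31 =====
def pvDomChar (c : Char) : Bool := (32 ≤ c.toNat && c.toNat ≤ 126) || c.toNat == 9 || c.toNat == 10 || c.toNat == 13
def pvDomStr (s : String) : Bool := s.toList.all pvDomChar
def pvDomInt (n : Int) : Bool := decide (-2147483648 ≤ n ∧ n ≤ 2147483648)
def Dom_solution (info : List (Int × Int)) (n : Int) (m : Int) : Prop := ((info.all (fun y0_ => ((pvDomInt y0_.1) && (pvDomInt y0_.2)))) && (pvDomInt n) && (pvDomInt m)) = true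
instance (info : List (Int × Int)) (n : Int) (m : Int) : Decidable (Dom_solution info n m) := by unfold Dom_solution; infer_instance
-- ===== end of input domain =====

-- B replaces A's weight-indexed knapsack (dense 0..total_b array of min a-costs, backward
-- in-place passes, INF sentinel, three special-cased returns) by the dual cost-keyed DP:
-- a dict from a-cost (pruned to < n) to the max b-sum at that cost, with one uniform final
-- min over qualifying costs: an alternative algorithm, proved to return the same value.


-- ===== PORT A =====
-- the body of A's inner backward loop (`for w in range(B, -1, -1): …`); all dp indexing is
-- exact for indices in [0, B], which Pre_solution (nonnegative a_i, b_i) guarantees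
def innerA (B : Int) (p : Int × Int) (dp : List Int) (w : Int) : List Int :=
  if PySem.List.pyGetD dp w 0 = 1000000000000 then dp
  else
    let nw := w + p.2
    let nw := if nw > B then B else nw
    if PySem.List.pyGetD dp nw 0 > PySem.List.pyGetD dp w 0 + p.1 then
      PySem.List.pySetD dp nw (PySem.List.pyGetD dp w 0 + p.1)
    else dp

-- one item's 0/1-knapsack pass over dp (the backward range loop)
def passA (B : Int) (dp : List Int) (p : Int × Int) : List Int :=
  (PySem.List.pyRange B (-1) (-1)).foldl (innerA B p) dp

def solution (info : List (Int × Int)) (n : Int) (m : Int) : Int :=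
  let totalB : Int := (info.map (fun p => p.2)).sum
  let B := totalB
  let need := totalB - m
  if need < 0 then (if 0 < n then 0 else -1)
  else
    let dp0 : List Int := (List.replicate (B + 1).toNat 1000000000000).set 0 0
    let dp := info.foldl (passA B) dp0
    let target := need + 1
    if target > B then -1
    else
      let ans := (PySem.List.pyRange target (B + 1) 1).foldl (fun ans w =>
        if PySem.List.pyGetD dp w 0 < ans ∧ PySem.List.pyGetD dp w 0 < n then
          PySem.List.pyGetD dp w 0
        else ans) 1000000000000
      if ans ≠ 1000000000000 then ans else -1

-- ===== PORT B =====
-- body of B's inner loop `for c, w in list(best.items()): …` (conditional insert at cost c+a)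
def innerB (nn a b : Int) (d : PySem.Dict Int Int) (cw : Int × Int) : PySem.Dict Int Int :=
  if cw.1 + a < nn ∧ (d.contains (cw.1 + a) = false ∨ d.getD (cw.1 + a) 0 < cw.2 + b) then
    d.insert (cw.1 + a) (cw.2 + b)
  else d

-- one item's pass: fold B's inner loop over the snapshot `list(best.items())`
def passB (nn : Int) (d : PySem.Dict Int Int) (p : Int × Int) : PySem.Dict Int Int :=
  d.items.foldl (innerB nn p.1 p.2) d

def solution_alt (info : List (Int × Int)) (n : Int) (m : Int) : Int :=
  let need := (info.map (fun p => p.2)).sum - m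
  let best : PySem.Dict Int Int := PySem.Dict.empty.insert 0 0
  let best := info.foldl (passB n) best
  let cands := ((best.items.filter (fun cw => decide (cw.2 > need) && decide (cw.1 < n))).map (·.1))
  match PySem.List.min? cands (fun x => x) with
  | some v => v
  | none => -1

-- ===== PRECONDITION & SPEC =====
-- Pre_ excludes items with a negative component, outside the problem's domain of nonnegative
-- costs: on negative b values A raises IndexError or silently reads/writes dp through Python's
-- negative-index wraparound, and on negative a values A's need<0 shortcut ignores subsets of
-- negative total a-cost.
def Pre_solution (info : List (Int × Int)) (n : Int) (m : Int) : Prop :=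
  ∀ p ∈ info, 0 ≤ p.1 ∧ 0 ≤ p.2
instance (info : List (Int × Int)) (n : Int) (m : Int) : Decidable (Pre_solution info n m) := by
  unfold Pre_solution; infer_instance

def pvWitness_solution : (List (Int × Int)) × Int × Int := ([(2, 3), (1, 1)], 4, 3)

def Spec_solution (info : List (Int × Int)) (n : Int) (m : Int) (out : Int) : Prop := out = solution_alt info n m
instance (info : List (Int × Int)) (n : Int) (m : Int) (out : Int) : Decidable (Spec_solution info n m out) := by unfold Spec_solution; infer_instance

-- ===== CLAIM (what is proved, stated in full; the proofs are below) =====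
def Claim_equal_solution : Prop := ∀ (info : List (Int × Int)) (n : Int) (m : Int), Dom_solution info n m → Pre_solution info n m → Spec_solution info n m (solution info n m)

-- ===== LEMMAS AND PROOFS =====

-- min / max of two optional values (none = "no subset")
def optMin : Option Int → Option Int → Option Int
  | none, o => o
  | some a, none => some a
  | some a, some b => some (min a b)

def optMax : Option Int → Option Int → Option Int
  | none, o => o
  | some a, none => some a
  | some a, some b => some (max a b)

-- M l w = minimum a-cost over sublists of l whose b-values sum to exactly w (none if unreachable)
def M : List (Int × Int) → Int → Option Int
  | [], w => if w = 0 then some 0 else none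
  | p :: l, w => optMin (M l w) ((M l (w - p.2)).map (· + p.1))

-- N l c = maximum b-sum over sublists of l whose a-values sum to exactly c (none if unreachable)
def N : List (Int × Int) → Int → Option Int
  | [], c => if c = 0 then some 0 else none
  | p :: l, c => optMax (N l c) ((N l (c - p.1)).map (· + p.2))

-- value of M clamped at A's sentinel
def clampM : Option Int → Int
  | none => 1000000000000
  | some v => min v 1000000000000

theorem optMax_none_right (o : Option Int) : optMax o none = o := by
  cases o <;> rfl

theorem clampM_optMin (o₁ o₂ : Option Int) :
    clampM (optMin o₁ o₂) = min (clampM o₁) (clampM o₂) := by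
  cases o₁ <;> cases o₂ <;> simp [optMin, clampM] <;> try omega

theorem optMin_map_add (o₁ o₂ : Option Int) (a : Int) :
    (optMin o₁ o₂).map (· + a) = optMin (o₁.map (· + a)) (o₂.map (· + a)) := by
  cases o₁ <;> cases o₂ <;> simp [optMin] <;> try omega

theorem optMax_map_add (o₁ o₂ : Option Int) (a : Int) :
    (optMax o₁ o₂).map (· + a) = optMax (o₁.map (· + a)) (o₂.map (· + a)) := by
  cases o₁ <;> cases o₂ <;> simp [optMax] <;> try omega

theorem optMin_middle (a b c d : Option Int) :
    optMin (optMin a c) (optMin b d) = optMin (optMin a b) (optMin c d) := by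
  cases a <;> cases b <;> cases c <;> cases d <;> simp [optMin] <;> omega

theorem optMax_middle (a b c d : Option Int) :
    optMax (optMax a c) (optMax b d) = optMax (optMax a b) (optMax c d) := by
  cases a <;> cases b <;> cases c <;> cases d <;> simp [optMax] <;> omega

theorem optMin_eq_some {o₁ o₂ : Option Int} {v : Int} (h : optMin o₁ o₂ = some v) :
    o₁ = some v ∨ o₂ = some v := by
  cases o₁ with
  | none => right; simpa [optMin] using h
  | some a =>
    cases o₂ with
    | none => left; simpa [optMin] using h
    | some b =>
      simp only [optMin, Option.some_inj] at h
      rcases min_choice a b with hc | hc <;> rw [hc] at h <;> simp [h]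

theorem optMax_eq_some {o₁ o₂ : Option Int} {v : Int} (h : optMax o₁ o₂ = some v) :
    o₁ = some v ∨ o₂ = some v := by
  cases o₁ with
  | none => right; simpa [optMax] using h
  | some a =>
    cases o₂ with
    | none => left; simpa [optMax] using h
    | some b =>
      simp only [optMax, Option.some_inj] at h
      rcases max_choice a b with hc | hc <;> rw [hc] at h <;> simp [h]

theorem optMin_some_left (u : Int) (z : Option Int) :
    ∃ v, optMin (some u) z = some v ∧ v ≤ u := by
  cases z with
  | none => exact ⟨u, rfl, le_rfl⟩
  | some b => exact ⟨min u b, rfl, min_le_left _ _⟩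

theorem optMin_some_right (u : Int) (z : Option Int) :
    ∃ v, optMin z (some u) = some v ∧ v ≤ u := by
  cases z with
  | none => exact ⟨u, rfl, le_rfl⟩
  | some b => exact ⟨min b u, rfl, min_le_right _ _⟩

theorem optMax_some_left (u : Int) (z : Option Int) :
    ∃ v, optMax (some u) z = some v ∧ u ≤ v := by
  cases z with
  | none => exact ⟨u, rfl, le_rfl⟩
  | some b => exact ⟨max u b, rfl, le_max_left _ _⟩

theorem optMax_some_right (u : Int) (z : Option Int) :
    ∃ v, optMax z (some u) = some v ∧ u ≤ v := by
  cases z with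
  | none => exact ⟨u, rfl, le_rfl⟩
  | some b => exact ⟨max b u, rfl, le_max_right _ _⟩

theorem M_append_singleton (l : List (Int × Int)) (q : Int × Int) (w : Int) :
    M (l ++ [q]) w = optMin (M l w) ((M l (w - q.2)).map (· + q.1)) := by
  induction l generalizing w with
  | nil => rfl
  | cons p l ih =>
    simp only [List.cons_append, M]
    rw [ih, ih]
    simp only [optMin_map_add, Option.map_map]
    rw [show w - p.2 - q.2 = w - q.2 - p.2 by ring,
        show ((fun x => x + p.1) ∘ (fun x => x + q.1)) = ((fun x => x + q.1) ∘ (fun x => x + p.1))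
          from funext (fun v => by simp only [Function.comp_apply]; ring)]
    exact optMin_middle _ _ _ _

theorem N_append_singleton (l : List (Int × Int)) (q : Int × Int) (c : Int) :
    N (l ++ [q]) c = optMax (N l c) ((N l (c - q.1)).map (· + q.2)) := by
  induction l generalizing c with
  | nil => rfl
  | cons p l ih =>
    simp only [List.cons_append, N]
    rw [ih, ih]
    simp only [optMax_map_add, Option.map_map]
    rw [show c - p.1 - q.1 = c - q.1 - p.1 by ring,
        show ((fun x => x + p.2) ∘ (fun x => x + q.2)) = ((fun x => x + q.2) ∘ (fun x => x + p.2))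
          from funext (fun v => by simp only [Function.comp_apply]; ring)]
    exact optMax_middle _ _ _ _

theorem M_nonneg (l : List (Int × Int)) (hl : ∀ p ∈ l, 0 ≤ p.1 ∧ 0 ≤ p.2)
    {w v : Int} (h : M l w = some v) : 0 ≤ v := by
  induction l generalizing w v with
  | nil =>
    simp only [M] at h
    split at h <;> simp_all
  | cons p l ih =>
    simp only [M] at h
    have hp := hl p (by simp)
    have hl' : ∀ x ∈ l, 0 ≤ x.1 ∧ 0 ≤ x.2 := fun x hx => hl x (by simp [hx])
    rcases h1 : M l w with _ | v1 <;> rcases h2 : M l (w - p.2) with _ | v2 <;>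
      rw [h1, h2] at h <;> simp [optMin] at h
    all_goals first
      | (have ha := ih hl' h1; have hb := ih hl' h2; omega)
      | (have := ih hl' h2; omega)
      | (have := ih hl' h1; omega)

theorem M_bound (l : List (Int × Int)) (hl : ∀ p ∈ l, 0 ≤ p.1 ∧ 0 ≤ p.2)
    {w v : Int} (h : M l w = some v) : 0 ≤ w ∧ w ≤ (l.map (fun p => p.2)).sum := by
  induction l generalizing w v with
  | nil =>
    simp only [M] at h
    split at h <;> simp_all
  | cons p l ih =>
    simp only [M] at h
    have hp := hl p (by simp)
    have hl' : ∀ x ∈ l, 0 ≤ x.1 ∧ 0 ≤ x.2 := fun x hx => hl x (by simp [hx])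
    simp only [List.map_cons, List.sum_cons]
    rcases h1 : M l w with _ | v1 <;> rcases h2 : M l (w - p.2) with _ | v2 <;>
      rw [h1, h2] at h <;> simp [optMin] at h
    all_goals first
      | (have ha := ih hl' h1; have hb := ih hl' h2; omega)
      | (have := ih hl' h2; omega)
      | (have := ih hl' h1; omega)

theorem N_bound (l : List (Int × Int)) (hl : ∀ p ∈ l, 0 ≤ p.1 ∧ 0 ≤ p.2)
    {c w : Int} (h : N l c = some w) :
    0 ≤ c ∧ 0 ≤ w ∧ w ≤ (l.map (fun p => p.2)).sum := by
  induction l generalizing c w with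
  | nil =>
    simp only [N] at h
    split at h <;> simp_all
  | cons p l ih =>
    simp only [N] at h
    have hp := hl p (by simp)
    have hl' : ∀ x ∈ l, 0 ≤ x.1 ∧ 0 ≤ x.2 := fun x hx => hl x (by simp [hx])
    simp only [List.map_cons, List.sum_cons]
    rcases h1 : N l c with _ | v1 <;> rcases h2 : N l (c - p.1) with _ | v2 <;>
      rw [h1, h2] at h <;> simp [optMax] at h
    · obtain ⟨ha1, ha2, ha3⟩ := ih hl' h2
      omega
    · obtain ⟨ha1, ha2, ha3⟩ := ih hl' h1
      omega
    · obtain ⟨ha1, ha2, ha3⟩ := ih hl' h1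
      obtain ⟨hb1, hb2, hb3⟩ := ih hl' h2
      rcases max_choice v1 (v2 + p.2) with hc | hc <;> rw [hc] at h <;> omega

theorem N_zero (l : List (Int × Int)) (hl : ∀ p ∈ l, 0 ≤ p.1 ∧ 0 ≤ p.2) :
    ∃ w, N l 0 = some w ∧ 0 ≤ w := by
  induction l with
  | nil => exact ⟨0, rfl, le_rfl⟩
  | cons p l ih =>
    obtain ⟨w, hw, hw0⟩ := ih (fun x hx => hl x (by simp [hx]))
    obtain ⟨v, hv, hwv⟩ := optMax_some_left w ((N l (0 - p.1)).map (· + p.2))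
    exact ⟨v, by simp only [N]; rw [hw]; exact hv, by omega⟩

theorem M_to_N (l : List (Int × Int)) :
    ∀ {w c : Int}, M l w = some c → ∃ w', N l c = some w' ∧ w ≤ w' := by
  induction l with
  | nil =>
    intro w c h
    simp only [M] at h
    split at h <;> simp_all [N]
  | cons p l ih =>
    intro w c h
    simp only [M] at h
    rcases optMin_eq_some h with h1 | h1
    · obtain ⟨w', hN, hww⟩ := ih h1
      obtain ⟨v, hv, hw'v⟩ := optMax_some_left w' ((N l (c - p.1)).map (· + p.2))
      exact ⟨v, by simp only [N]; rw [hN]; exact hv, by omega⟩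
    · rcases h2 : M l (w - p.2) with _ | c₀ <;> rw [h2] at h1
      · simp at h1
      · simp only [Option.map_some, Option.some_inj] at h1
        obtain ⟨w'', hN, hww⟩ := ih h2
        have hc₀ : c - p.1 = c₀ := by omega
        obtain ⟨v, hv, hle⟩ := optMax_some_right (w'' + p.2) (N l c)
        refine ⟨v, ?_, by omega⟩
        simp only [N]
        rw [hc₀, hN]
        simpa using hv

theorem N_to_M (l : List (Int × Int)) :
    ∀ {c w : Int}, N l c = some w → ∃ c', M l w = some c' ∧ c' ≤ c := by
  induction l with
  | nil =>
    intro c w h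
    simp only [N] at h
    split at h <;> simp_all [M]
  | cons p l ih =>
    intro c w h
    simp only [N] at h
    rcases optMax_eq_some h with h1 | h1
    · obtain ⟨c', hM, hcc⟩ := ih h1
      obtain ⟨v, hv, hvc'⟩ := optMin_some_left c' ((M l (w - p.2)).map (· + p.1))
      exact ⟨v, by simp only [M]; rw [hM]; exact hv, by omega⟩
    · rcases h2 : N l (c - p.1) with _ | w₀ <;> rw [h2] at h1
      · simp at h1
      · simp only [Option.map_some, Option.some_inj] at h1
        obtain ⟨c'', hM, hcc⟩ := ih h2
        have hw₀ : w - p.2 = w₀ := by omega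
        obtain ⟨v, hv, hle⟩ := optMin_some_right (c'' + p.1) (M l w)
        refine ⟨v, ?_, by omega⟩
        simp only [M]
        rw [hw₀, hM]
        simpa using hv

theorem bsum_nonneg (l : List (Int × Int)) (hl : ∀ p ∈ l, 0 ≤ p.1 ∧ 0 ≤ p.2) :
    0 ≤ (l.map (fun p => p.2)).sum := by
  induction l with
  | nil => simp
  | cons p l ih =>
    have hp := hl p (by simp)
    have := ih (fun x hx => hl x (by simp [hx]))
    simp only [List.map_cons, List.sum_cons]
    omega

-- ---- A-side: the backward pass computes the standard functional 0/1-knapsack update ----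

theorem pyRange_down_cons (a : Int) (h : 0 ≤ a) :
    PySem.List.pyRange a (-1) (-1) = a :: PySem.List.pyRange (a - 1) (-1) (-1) := by
  simp only [PySem.List.pyRange]
  norm_num
  rw [if_pos (show (-1:Int) < a by omega),
      show (a + 1).toNat = a.toNat + 1 by omega, List.range_succ_eq_map]
  by_cases h2 : (0:Int) < a
  · rw [if_pos h2]
    simp only [List.map_cons, List.map_map, Nat.cast_zero, neg_zero, add_zero]
    congr 1
    apply List.map_congr_left
    intro k hk
    simp [Function.comp]
    ring
  · rw [if_neg h2]
    have : a = 0 := by omega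
    subst this
    norm_num

theorem pyRange_down_nil : PySem.List.pyRange (-1) (-1) (-1) = [] := by
  simp [PySem.List.pyRange]

-- the functional update one pass is proved to compute
def updA (dp : List Int) (a b : Int) (x : Int) : Int :=
  if 0 ≤ x - b ∧ PySem.List.pyGetD dp (x - b) 0 ≠ 1000000000000 ∧
      PySem.List.pyGetD dp x 0 > PySem.List.pyGetD dp (x - b) 0 + a then
    PySem.List.pyGetD dp (x - b) 0 + a
  else PySem.List.pyGetD dp x 0

theorem val_set_self (l : List Int) (i v : Int) (hi : 0 ≤ i) (hil : i < (l.length : Int)) :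
    PySem.List.pyGetD (l.set i.toNat v) i 0 = v := by
  rw [PySem.List.pyGetD_eq_getElem _ _ hi (by simp only [List.length_set]; exact hil)]
  exact List.getElem_set_self _

theorem val_set_ne (l : List Int) (i x v : Int) (hi : 0 ≤ i) (hx : 0 ≤ x)
    (hxl : x < (l.length : Int)) (hne : x ≠ i) :
    PySem.List.pyGetD (l.set i.toNat v) x 0 = PySem.List.pyGetD l x 0 := by
  rw [PySem.List.pyGetD_eq_getElem _ _ hx (by simp only [List.length_set]; exact hxl),
      PySem.List.pyGetD_eq_getElem _ _ hx hxl]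
  exact List.getElem_set_ne (by omega) _

theorem loopA_spec (B a b : Int) (dp : List Int)
    (hlen : dp.length = (B + 1).toNat) (hB : 0 ≤ B) (hb : 0 ≤ b)
    (hreach : ∀ w : Int, 0 ≤ w → w ≤ B → PySem.List.pyGetD dp w 0 ≠ 1000000000000 → w + b ≤ B) :
    ∀ (t : Nat) (k : Int), k = (t : Int) - 1 → k ≤ B →
    ∀ dpc : List Int, dpc.length = dp.length →
    (∀ x : Int, 0 ≤ x → x ≤ B → PySem.List.pyGetD dpc x 0 =
        if k < x - b ∧ PySem.List.pyGetD dp (x - b) 0 ≠ 1000000000000 ∧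
           PySem.List.pyGetD dp x 0 > PySem.List.pyGetD dp (x - b) 0 + a
        then PySem.List.pyGetD dp (x - b) 0 + a else PySem.List.pyGetD dp x 0) →
    ((PySem.List.pyRange k (-1) (-1)).foldl (innerA B (a, b)) dpc).length = dp.length ∧
    (∀ x : Int, 0 ≤ x → x ≤ B →
      PySem.List.pyGetD ((PySem.List.pyRange k (-1) (-1)).foldl (innerA B (a, b)) dpc) x 0 =
        updA dp a b x) := by
  intro t
  induction t with
  | zero =>
    intro k hk hkB dpc hclen hstate
    have hk1 : k = -1 := by omega
    subst hk1
    rw [pyRange_down_nil]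
    refine ⟨hclen, fun x hx1 hx2 => ?_⟩
    rw [List.foldl_nil, hstate x hx1 hx2, updA]
    exact if_congr (and_congr_left' (by omega)) rfl rfl
  | succ t ih =>
    intro k hk hkB dpc hclen hstate
    have hk0 : 0 ≤ k := by omega
    rw [pyRange_down_cons k hk0, List.foldl_cons]
    have hkdp : PySem.List.pyGetD dpc k 0 = PySem.List.pyGetD dp k 0 := by
      rw [hstate k hk0 hkB, if_neg]
      rintro ⟨h1, -, -⟩
      omega
    by_cases hINF : PySem.List.pyGetD dp k 0 = 1000000000000
    · have hdpc' : innerA B (a, b) dpc k = dpc := by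
        rw [innerA, if_pos (by rw [hkdp]; exact hINF)]
      rw [hdpc']
      refine ih (k - 1) (by omega) (by omega) dpc hclen ?_
      intro x hx1 hx2
      rw [hstate x hx1 hx2]
      by_cases hxb : x - b = k
      · rw [if_neg (by rintro ⟨h1, -, -⟩; omega),
            if_neg (by rintro ⟨-, hne, -⟩; exact hne (by rw [hxb]; exact hINF))]
      · exact if_congr (and_congr_left' (by omega)) rfl rfl
    · have hfit : k + b ≤ B := hreach k hk0 hkB hINF
      have hnwv : PySem.List.pyGetD dpc (k + b) 0 = PySem.List.pyGetD dp (k + b) 0 := by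
        rw [hstate (k + b) (by omega) (by omega), if_neg]
        rintro ⟨h1, -, -⟩
        omega
      have hdpc' : innerA B (a, b) dpc k =
          if PySem.List.pyGetD dp (k + b) 0 > PySem.List.pyGetD dp k 0 + a then
            dpc.set (k + b).toNat (PySem.List.pyGetD dp k 0 + a)
          else dpc := by
        rw [innerA, if_neg (by rw [hkdp]; exact hINF)]
        simp only [if_neg (show ¬ k + b > B by omega), hkdp, hnwv,
          PySem.List.pySetD_of_nonneg dpc (PySem.List.pyGetD dp k 0 + a)
            (show (0:Int) ≤ k + b by omega)]
      rw [hdpc']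
      by_cases hgt : PySem.List.pyGetD dp (k + b) 0 > PySem.List.pyGetD dp k 0 + a
      · rw [if_pos hgt]
        refine ih (k - 1) (by omega) (by omega) _ (by rw [List.length_set]; exact hclen) ?_
        intro x hx1 hx2
        have hxlen : x < (dpc.length : Int) := by
          rw [hclen, hlen]; omega
        by_cases hx : x = k + b
        · rw [show x = k + b from hx,
              val_set_self dpc (k + b) _ (by omega) (by rw [hclen, hlen]; omega),
              if_pos ⟨by omega, by rw [show k + b - b = k by ring]; exact hINF,
                by rw [show k + b - b = k by ring]; exact hgt⟩,
              show k + b - b = k by ring]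
        · rw [val_set_ne dpc (k + b) x _ (by omega) hx1 hxlen hx, hstate x hx1 hx2]
          by_cases hxb : x - b = k
          · exact absurd (by omega : x = k + b) hx
          · exact if_congr (and_congr_left' (by omega)) rfl rfl
      · rw [if_neg hgt]
        refine ih (k - 1) (by omega) (by omega) dpc hclen ?_
        intro x hx1 hx2
        rw [hstate x hx1 hx2]
        by_cases hxb : x - b = k
        · rw [if_neg (by rintro ⟨h1, -, -⟩; omega),
              if_neg (by rintro ⟨-, -, hg⟩; rw [hxb] at hg; exact hgt (by rw [show x = k + b by omega] at hg; exact hg))]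
        · exact if_congr (and_congr_left' (by omega)) rfl rfl

theorem passA_spec (B a b : Int) (dp : List Int)
    (hlen : dp.length = (B + 1).toNat) (hB : 0 ≤ B) (hb : 0 ≤ b)
    (hreach : ∀ w : Int, 0 ≤ w → w ≤ B → PySem.List.pyGetD dp w 0 ≠ 1000000000000 → w + b ≤ B) :
    (passA B dp (a, b)).length = dp.length ∧
    ∀ x : Int, 0 ≤ x → x ≤ B →
      PySem.List.pyGetD (passA B dp (a, b)) x 0 = updA dp a b x := by
  have := loopA_spec B a b dp hlen hB hb hreach (B + 1).toNat B (by omega) le_rfl dp rfl ?_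
  · exact ⟨this.1, this.2⟩
  · intro x hx1 hx2
    rw [if_neg]
    rintro ⟨h1, -, -⟩
    omega

-- the A-side invariant after processing a prefix l of info (S = total b-sum of info)
def InvA (S : Int) (l : List (Int × Int)) (dp : List Int) : Prop :=
  dp.length = (S + 1).toNat ∧ ∀ w : Int, 0 ≤ w → w ≤ S →
    (min (PySem.List.pyGetD dp w 0) 1000000000000 = clampM (M l w)) ∧
    (PySem.List.pyGetD dp w 0 ≠ 1000000000000 → (M l w).isSome)

theorem InvA_step (S : Int) (l : List (Int × Int)) (dp : List Int) (q : Int × Int)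
    (hS : 0 ≤ S) (ha : 0 ≤ q.1) (hb : 0 ≤ q.2)
    (hl : ∀ p ∈ l, 0 ≤ p.1 ∧ 0 ≤ p.2)
    (hfit : (l.map (fun p => p.2)).sum + q.2 ≤ S)
    (hinv : InvA S l dp) : InvA S (l ++ [q]) (passA S dp q) := by
  obtain ⟨hlen, hvals⟩ := hinv
  have hreach : ∀ w : Int, 0 ≤ w → w ≤ S →
      PySem.List.pyGetD dp w 0 ≠ 1000000000000 → w + q.2 ≤ S := by
    intro w hw1 hw2 hne
    have hsome := (hvals w hw1 hw2).2 hne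
    rcases hMl : M l w with _ | v
    · rw [hMl] at hsome; simp at hsome
    · have := (M_bound l hl hMl).2
      have hb0 := bsum_nonneg l hl
      omega
  have hq : passA S dp q = passA S dp (q.1, q.2) := rfl
  have hspec := passA_spec S q.1 q.2 dp hlen hS hb hreach
  constructor
  · rw [hq, hspec.1, hlen]
  · intro w hw1 hw2
    rw [hq, hspec.2 w hw1 hw2, M_append_singleton, clampM_optMin, updA]
    have hA := (hvals w hw1 hw2).1
    have hsome_x := (hvals w hw1 hw2).2
    constructor
    · -- clamped-value equation
      rw [← hA]
      by_cases hyb : 0 ≤ w - q.2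
      · have hB := (hvals (w - q.2) hyb (by omega)).1
        rcases h2 : M l (w - q.2) with _ | v2 <;> rw [h2] at hB
        · simp only [clampM] at hB ⊢
          simp only [Option.map_none]
          split_ifs with h <;> omega
        · simp only [clampM] at hB ⊢
          simp only [Option.map_some]
          split_ifs with h <;> omega
      · rcases h2 : M l (w - q.2) with _ | v2
        · simp only [clampM, Option.map_none]
          split_ifs with h <;> omega
        · exact absurd (M_bound l hl h2).1 hyb
    · -- isSome propagation
      intro hne
      split_ifs at hne with hcond
      · obtain ⟨hyb, hyne, -⟩ := hcond
        have := (hvals (w - q.2) hyb (by omega)).2 hyne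
        rcases h2 : M l (w - q.2) with _ | v2
        · rw [h2] at this; simp at this
        · rcases M l w with _ | v1 <;> simp [optMin]
      · have := hsome_x hne
        rcases h1 : M l w with _ | v1
        · rw [h1] at this; simp at this
        · rcases (M l (w - q.2)).map (· + q.1) with _ | v2 <;> simp [optMin]

theorem InvA_full (info : List (Int × Int)) (hPre : ∀ p ∈ info, 0 ≤ p.1 ∧ 0 ≤ p.2)
    (S : Int) (hS : S = (info.map (fun p => p.2)).sum) :
    InvA S info (info.foldl (passA S) ((List.replicate (S + 1).toNat 1000000000000).set 0 0)) := by
  have hS0 : 0 ≤ S := hS ▸ bsum_nonneg info hPre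
  have base : InvA S [] ((List.replicate (S + 1).toNat 1000000000000).set 0 0) := by
    constructor
    · rw [List.length_set, List.length_replicate]
    · intro w hw1 hw2
      have hlen : (((List.replicate (S + 1).toNat (1000000000000:Int)).length : Int)) = S + 1 := by
        rw [List.length_replicate]; omega
      have hcast : (List.replicate (S + 1).toNat (1000000000000:Int)).set 0 0 =
          (List.replicate (S + 1).toNat (1000000000000:Int)).set (0:Int).toNat 0 := rfl
      by_cases hw0 : w = 0
      · subst hw0
        rw [hcast, val_set_self _ 0 0 le_rfl (by omega)]
        constructor
        · simp [M, clampM]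
        · intro; simp [M]
      · rw [hcast, val_set_ne _ 0 w 0 le_rfl hw1 (by omega) hw0,
            PySem.List.pyGetD_eq_getElem _ _ hw1 (by omega), List.getElem_replicate]
        constructor
        · simp [M, hw0, clampM]
        · intro h; exact absurd rfl h
  suffices h : ∀ (l₂ l₁ : List (Int × Int)) (dp : List Int),
      (∀ p ∈ l₁ ++ l₂, 0 ≤ p.1 ∧ 0 ≤ p.2) →
      ((l₁ ++ l₂).map (fun p => p.2)).sum ≤ S → InvA S l₁ dp →
      InvA S (l₁ ++ l₂) (l₂.foldl (passA S) dp) by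
    have := h info [] _ (by simpa using hPre) (by simp [hS]) base
    simpa using this
  intro l₂
  induction l₂ with
  | nil => intro l₁ dp h1 h2 h3; simpa using h3
  | cons p t ih =>
    intro l₁ dp h1 h2 h3
    have hmem : ∀ x ∈ l₁ ++ [p], 0 ≤ x.1 ∧ 0 ≤ x.2 := by
      intro x hx
      apply h1
      rcases List.mem_append.mp hx with h | h
      · exact List.mem_append.mpr (Or.inl h)
      · simp at h; subst h; simp
    have hl₁ : ∀ x ∈ l₁, 0 ≤ x.1 ∧ 0 ≤ x.2 := fun x hx => hmem x (List.mem_append.mpr (Or.inl hx))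
    have hp := h1 p (by simp)
    have hsumsplit : ((l₁ ++ p :: t).map (fun x => x.2)).sum =
        (l₁.map (fun x => x.2)).sum + p.2 + (t.map (fun x => x.2)).sum := by
      simp; ring
    have htn : 0 ≤ (t.map (fun x => x.2)).sum :=
      bsum_nonneg t (fun x hx => h1 x (by simp [hx]))
    have hfit : (l₁.map (fun x => x.2)).sum + p.2 ≤ S := by omega
    have hstep := InvA_step S l₁ dp p hS0 hp.1 hp.2 hl₁ hfit h3
    have := ih (l₁ ++ [p]) (passA S dp p) (by simpa using h1) (by simpa using h2) hstep
    simpa using this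

-- ---- B-side: the cost-keyed dict after the folds holds exactly N info (capped at n) ----

theorem innerB_get (nn a b : Int) (d : PySem.Dict Int Int) (cw : Int × Int) (k : Int) :
    (innerB nn a b d cw).get? k =
      if k = cw.1 + a ∧ k < nn then optMax (d.get? k) (some (cw.2 + b)) else d.get? k := by
  rw [innerB]
  by_cases hk : k = cw.1 + a ∧ k < nn
  · rw [if_pos hk]
    obtain ⟨hk1, hk2⟩ := hk
    rcases hc : d.get? (cw.1 + a) with _ | v
    · have hcf : d.contains (cw.1 + a) = false :=
        (PySem.Dict.get?_eq_none_iff_contains _ _).mp hc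
      rw [if_pos ⟨by omega, Or.inl hcf⟩, PySem.Dict.get?_insert, if_pos hk1, hk1, hc]
      rfl
    · have hct : ¬ d.contains (cw.1 + a) = false := by
        rw [PySem.Dict.contains_eq_isSome_get?, hc]
        simp
      have hgd : d.getD (cw.1 + a) 0 = v := by
        rw [PySem.Dict.getD_eq_get?_getD, hc]
        rfl
      rw [hgd]
      by_cases hlt : v < cw.2 + b
      · rw [if_pos ⟨by omega, Or.inr hlt⟩, PySem.Dict.get?_insert, if_pos hk1, hk1, hc]
        simp only [optMax]
        congr 1
        omega
      · rw [if_neg (by rintro ⟨-, h | h⟩; exact hct h; exact hlt h), hk1, hc]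
        simp only [optMax]
        congr 1
        omega
  · rw [if_neg hk]
    split_ifs with h
    · rw [PySem.Dict.get?_insert, if_neg (by rintro rfl; exact hk ⟨rfl, h.1⟩)]
    · rfl

theorem foldB_get (nn a b : Int) :
    ∀ (s : List (Int × Int)) (d : PySem.Dict Int Int), (s.map (fun cw => cw.1)).Nodup →
    ∀ k : Int, (s.foldl (innerB nn a b) d).get? k =
      optMax (d.get? k)
        (if k < nn then ((s.find? (fun cw => cw.1 == k - a)).map (fun cw => cw.2)).map (· + b)
         else none) := by
  intro s
  induction s with
  | nil =>
    intro d hnd k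
    simp only [List.foldl_nil, List.find?_nil, Option.map_none, ite_self, optMax_none_right]
  | cons cw t ih =>
    intro d hnd k
    rw [List.foldl_cons, ih (innerB nn a b d cw) (by simp at hnd; exact hnd.2), innerB_get]
    by_cases hka : k = cw.1 + a
    · have hhd : ((fun x : Int × Int => x.1 == k - a) cw) = true := by simp; omega
      have hnd' := hnd
      rw [List.map_cons, List.nodup_cons] at hnd'
      have hnone : t.find? (fun x => x.1 == k - a) = none := by
        apply List.find?_eq_none.mpr
        intro x hx
        simp only [beq_iff_eq]
        intro hx1
        exact hnd'.1 (List.mem_map.mpr ⟨x, hx, by omega⟩)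
      rw [List.find?_cons_of_pos (p := fun x : Int × Int => x.1 == k - a) (l := t) hhd, hnone]
      by_cases hkn : k < nn
      · rw [if_pos ⟨hka, hkn⟩, if_pos hkn, if_pos hkn]
        simp only [Option.map_none, Option.map_some, optMax_none_right]
      · rw [if_neg (by rintro ⟨-, h⟩; exact hkn h), if_neg hkn, if_neg hkn, optMax_none_right]
    · have hhd : ¬ ((fun x : Int × Int => x.1 == k - a) cw) = true := by simp; omega
      rw [if_neg (by rintro ⟨h, -⟩; exact hka h),
          List.find?_cons_of_neg (p := fun x : Int × Int => x.1 == k - a) (l := t) hhd]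

theorem foldB_nodup (nn a b : Int) :
    ∀ (s : List (Int × Int)) (d : PySem.Dict Int Int), d.keys.Nodup →
      (s.foldl (innerB nn a b) d).keys.Nodup := by
  intro s
  induction s with
  | nil => intro d h; exact h
  | cons cw t ih =>
    intro d h
    rw [List.foldl_cons]
    apply ih
    rw [innerB]
    split_ifs with hc
    · exact PySem.Dict.nodup_keys_insert _ _ _ h
    · exact h

-- the B-side invariant: costs < nn carry the max b-sum N, costs ≥ nn are never stored
def InvB (nn : Int) (l : List (Int × Int)) (d : PySem.Dict Int Int) : Prop :=
  d.keys.Nodup ∧ ∀ c : Int, d.get? c = if c < nn then N l c else none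

theorem InvB_step (nn : Int) (l : List (Int × Int)) (q : Int × Int) (d : PySem.Dict Int Int)
    (ha : 0 ≤ q.1) (hinv : InvB nn l d) : InvB nn (l ++ [q]) (passB nn d q) := by
  obtain ⟨hnd, hget⟩ := hinv
  constructor
  · exact foldB_nodup _ _ _ _ _ hnd
  · intro k
    rw [passB, foldB_get nn q.1 q.2 d.items d hnd k]
    have hfind : ((d.items.find? (fun cw => cw.1 == k - q.1)).map (fun cw => cw.2)) =
        d.get? (k - q.1) := rfl
    rw [hfind, hget k, hget (k - q.1), N_append_singleton]
    by_cases hkn : k < nn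
    · rw [if_pos hkn, if_pos hkn, if_pos hkn, if_pos (show k - q.1 < nn by omega)]
    · rw [if_neg hkn, if_neg hkn, if_neg hkn]
      rfl

theorem InvB_full (nn : Int) (hn : 0 < nn) :
    ∀ (info : List (Int × Int)), (∀ p ∈ info, 0 ≤ p.1) →
      InvB nn info (info.foldl (passB nn) (PySem.Dict.empty.insert 0 0)) := by
  intro info
  induction info using List.reverseRecOn with
  | nil =>
    intro _
    constructor
    · exact PySem.Dict.nodup_keys_insert _ _ _ PySem.Dict.nodup_keys_empty
    · intro c
      rw [List.foldl_nil, PySem.Dict.get?_insert]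
      by_cases hc : c = 0
      · subst hc
        rw [if_pos rfl, if_pos (by omega)]
        simp [N]
      · rw [if_neg hc, PySem.Dict.get?_empty]
        simp only [N]
        rw [if_neg hc, ite_self]
  | append_singleton l q ih =>
    intro h
    rw [List.foldl_append, List.foldl_cons, List.foldl_nil]
    exact InvB_step nn l q _ (h q (by simp))
      (ih (fun p hp => h p (by simp [hp])))

-- with n ≤ 0 and nonnegative costs no insert ever fires: best stays {0: 0}
theorem foldB_trivial (nn : Int) (hn : nn ≤ 0) :
    ∀ (info : List (Int × Int)), (∀ p ∈ info, 0 ≤ p.1) →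
      info.foldl (passB nn) (PySem.Dict.empty.insert 0 0) = PySem.Dict.empty.insert 0 0 := by
  intro info
  induction info with
  | nil => intro _; rfl
  | cons p t ih =>
    intro h
    rw [List.foldl_cons]
    have hp := h p (by simp)
    have hpass : passB nn (PySem.Dict.empty.insert 0 0) p = PySem.Dict.empty.insert 0 0 := by
      rw [passB]
      have hitems : (PySem.Dict.empty.insert (0:Int) (0:Int)).items = [((0:Int), (0:Int))] := rfl
      rw [hitems, List.foldl_cons, List.foldl_nil, innerB, if_neg]
      rintro ⟨h1, -⟩
      simp only at h1
      omega
    rw [hpass]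
    exact ih (fun x hx => h x (by simp [hx]))

-- ---- final-scan characterizations ----

theorem foldmin_le_init (l : List Int) (acc : Int) : l.foldl min acc ≤ acc := by
  induction l generalizing acc with
  | nil => simp
  | cons x t ih => exact le_trans (ih (min acc x)) (by omega)

theorem foldmin_le_mem (l : List Int) (acc x : Int) (hx : x ∈ l) : l.foldl min acc ≤ x := by
  induction l generalizing acc with
  | nil => simp at hx
  | cons y t ih =>
    rcases List.mem_cons.mp hx with h | h
    · subst h
      exact le_trans (foldmin_le_init t (min acc x)) (by omega)
    · exact ih (min acc y) h

theorem foldmin_mem_or_init (l : List Int) (acc : Int) :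
    l.foldl min acc = acc ∨ l.foldl min acc ∈ l := by
  induction l generalizing acc with
  | nil => left; rfl
  | cons x t ih =>
    rw [List.foldl_cons]
    rcases ih (min acc x) with h | h
    · by_cases hax : acc ≤ x
      · left; rw [h]; omega
      · right
        rw [h, show min acc x = x by omega]
        exact List.mem_cons_self
    · right; exact List.mem_cons_of_mem _ h

theorem scanA_eq (dp : List Int) (n : Int) :
    ∀ (ws : List Int) (acc : Int),
    ws.foldl (fun ans w =>
      if PySem.List.pyGetD dp w 0 < ans ∧ PySem.List.pyGetD dp w 0 < n then
        PySem.List.pyGetD dp w 0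
      else ans) acc =
    ((ws.filter (fun w => decide (PySem.List.pyGetD dp w 0 < n))).map
      (fun w => PySem.List.pyGetD dp w 0)).foldl min acc := by
  intro ws
  induction ws with
  | nil => intro acc; rfl
  | cons w t ih =>
    intro acc
    rw [List.foldl_cons, ih]
    by_cases hw : PySem.List.pyGetD dp w 0 < n
    · rw [List.filter_cons_of_pos (by simpa using hw), List.map_cons, List.foldl_cons]
      congr 1
      split_ifs with h <;> omega
    · rw [List.filter_cons_of_neg (by simpa using hw), if_neg (by rintro ⟨-, h⟩; exact hw h)]

-- ===== VERDICT (by name: the statement is the Claim_ definition above) =====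
theorem solution_spec : Claim_equal_solution := by
  intro info n m hDom hPre
  have hPre' : ∀ p ∈ info, 0 ≤ p.1 ∧ 0 ≤ p.2 := hPre
  have hPa : ∀ p ∈ info, 0 ≤ p.1 := fun p hp => (hPre' p hp).1
  have hn31 : n ≤ 2147483648 := by
    simp only [Dom_solution, Bool.and_eq_true, pvDomInt, decide_eq_true_eq] at hDom
    exact hDom.1.2.2
  simp only [Spec_solution, solution, solution_alt]
  set S : Int := (List.map (fun p => p.2) info).sum with hSdef
  have hS0 : 0 ≤ S := hSdef ▸ bsum_nonneg info hPre'
  set dp := List.foldl (passA S) ((List.replicate (S + 1).toNat 1000000000000).set 0 0) info with hdp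
  obtain ⟨hlenA, hvalsA⟩ := InvA_full info hPre' S hSdef
  rw [← hdp] at hvalsA
  set best := List.foldl (passB n) (PySem.Dict.empty.insert 0 0) info with hbest
  set cands := ((best.items.filter (fun cw => decide (cw.2 > S - m) && decide (cw.1 < n))).map
    (fun cw => cw.1)) with hcands
  by_cases hn0 : 0 < n
  · -- invariant-based characterization of B's candidate list
    obtain ⟨hnd, hget⟩ := InvB_full n hn0 info hPa
    rw [← hbest] at hnd hget
    have hc_mem : ∀ c : Int, c ∈ cands ↔ ∃ w, N info c = some w ∧ S - m < w ∧ c < n := by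
      intro c
      constructor
      · intro hc
        obtain ⟨cw, hcw, hc2⟩ := List.mem_map.mp hc
        obtain ⟨hmem, hcond⟩ := List.mem_filter.mp hcw
        simp only [Bool.and_eq_true, decide_eq_true_eq] at hcond
        have hg : best.get? cw.1 = some cw.2 :=
          (PySem.Dict.get?_eq_some_iff_mem_items best cw.1 cw.2 hnd).mpr hmem
        rw [hget cw.1, if_pos (hc2 ▸ hcond.2)] at hg
        exact ⟨cw.2, hc2 ▸ hg, hcond.1, hc2 ▸ hcond.2⟩
      · rintro ⟨w, hN, hw, hcn⟩
        apply List.mem_map.mpr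
        refine ⟨(c, w), List.mem_filter.mpr ⟨?_, ?_⟩, rfl⟩
        · exact (PySem.Dict.get?_eq_some_iff_mem_items best c w hnd).mp
            (by rw [hget c, if_pos hcn]; exact hN)
        · simp only [Bool.and_eq_true, decide_eq_true_eq]
          exact ⟨hw, hcn⟩
    by_cases hneed : S - m < 0
    · -- A's shortcut: returns 0; B finds cost 0 via the empty subset
      rw [if_pos hneed, if_pos hn0]
      obtain ⟨w0, hN0, h0w⟩ := N_zero info hPre'
      have h0 : (0 : Int) ∈ cands := (hc_mem 0).mpr ⟨w0, hN0, by omega, hn0⟩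
      rcases hmin : PySem.List.min? cands (fun x => x) with _ | v
      · rw [(PySem.List.min?_eq_none_iff cands _).mp hmin] at h0
        simp at h0
      · have hv := PySem.List.min?_mem hmin
        obtain ⟨w, hN, -, -⟩ := (hc_mem v).mp hv
        have hv0 : 0 ≤ v := (N_bound info hPre' hN).1
        have hvle : v ≤ 0 := by
          have := PySem.List.min?_isMin hmin 0 h0
          simpa using this
        show (0 : Int) = v
        omega
    · rw [if_neg hneed]
      by_cases htg : S - m + 1 > S
      · -- need ≥ total_b: no subset's b-sum can exceed need
        rw [if_pos htg]
        have hempty : cands = [] := by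
          rw [List.eq_nil_iff_forall_not_mem]
          intro c hc
          obtain ⟨w, hN, hw, -⟩ := (hc_mem c).mp hc
          have := (N_bound info hPre' hN).2.2
          omega
        rw [hempty]
        rfl
      · -- main case
        rw [if_neg htg]
        have hINFn : n < 1000000000000 := by omega
        rw [scanA_eq]
        set L := (((PySem.List.pyRange (S - m + 1) (S + 1) 1).filter
            (fun w => decide (PySem.List.pyGetD dp w 0 < n))).map
            (fun w => PySem.List.pyGetD dp w 0)) with hL
        have hLmem : ∀ y : Int, y ∈ L ↔
            ∃ w, S - m < w ∧ w ≤ S ∧ M info w = some y ∧ y < n := by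
          intro y
          constructor
          · intro hy
            obtain ⟨w, hwmem, hy2⟩ := List.mem_map.mp hy
            obtain ⟨hwr, hcond⟩ := List.mem_filter.mp hwmem
            simp only [decide_eq_true_eq] at hcond
            obtain ⟨hw1, hw2⟩ := PySem.List.mem_pyRange_one.mp hwr
            have hA1 := (hvalsA w (by omega) (by omega)).1
            refine ⟨w, by omega, by omega, ?_, by omega⟩
            rcases hM : M info w with _ | u
            · rw [hM] at hA1
              simp only [clampM] at hA1
              omega
            · rw [hM] at hA1
              simp only [clampM] at hA1
              have : u = y := by omega
              rw [this]
          · rintro ⟨w, hw1, hw2, hM, hyn⟩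
            have hA1 := (hvalsA w (by omega) (by omega)).1
            rw [hM] at hA1
            simp only [clampM] at hA1
            have hy0 : 0 ≤ y := M_nonneg info hPre' hM
            have hval : PySem.List.pyGetD dp w 0 = y := by omega
            exact List.mem_map.mpr ⟨w, List.mem_filter.mpr
              ⟨PySem.List.mem_pyRange_one.mpr ⟨by omega, by omega⟩,
               by simp only [decide_eq_true_eq]; omega⟩, hval⟩
        rcases hmin : PySem.List.min? cands (fun x => x) with _ | v
        · -- no candidate on B's side ⇒ A's scan list is empty too
          have hcnil := (PySem.List.min?_eq_none_iff cands _).mp hmin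
          have hLnil : L = [] := by
            rw [List.eq_nil_iff_forall_not_mem]
            intro y hy
            obtain ⟨w, hw1, hw2, hM, hyn⟩ := (hLmem y).mp hy
            obtain ⟨w', hN, hww'⟩ := M_to_N info hM
            have : y ∈ cands := (hc_mem y).mpr ⟨w', hN, by omega, hyn⟩
            rw [hcnil] at this
            simp at this
          rw [hLnil]
          simp
        · have hv := PySem.List.min?_mem hmin
          obtain ⟨w, hN, hwneed, hvn⟩ := (hc_mem v).mp hv
          obtain ⟨hv0, hw0, hwS⟩ := N_bound info hPre' hN
          obtain ⟨c', hM, hc'v⟩ := N_to_M info hN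
          have hc'L : c' ∈ L := (hLmem c').mpr ⟨w, by omega, by omega, hM, by omega⟩
          have h1 : L.foldl min 1000000000000 ≤ c' := foldmin_le_mem L _ c' hc'L
          have h2 : L.foldl min 1000000000000 = v := by
            rcases foldmin_mem_or_init L 1000000000000 with h | h
            · omega
            · obtain ⟨w'', hw''1, hw''2, hM'', hyn''⟩ := (hLmem _).mp h
              obtain ⟨w''', hN''', hge⟩ := M_to_N info hM''
              have hmemc : L.foldl min 1000000000000 ∈ cands :=
                (hc_mem _).mpr ⟨w''', hN''', by omega, hyn''⟩
              have := PySem.List.min?_isMin hmin _ hmemc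
              simp at this
              omega
          rw [h2, if_pos (by omega : v ≠ 1000000000000)]
  · -- n ≤ 0: both sides return -1
    have hbest_triv : best = PySem.Dict.empty.insert 0 0 :=
      hbest ▸ foldB_trivial n (by omega) info hPa
    have hcnil : cands = [] := by
      rw [hcands, hbest_triv]
      have hitems : (PySem.Dict.empty.insert (0:Int) (0:Int)).items = [((0:Int), (0:Int))] := rfl
      rw [hitems]
      rw [List.filter_cons_of_neg (by simp; omega)]
      rfl
    rw [hcnil]
    by_cases hneed : S - m < 0
    · rw [if_pos hneed, if_neg hn0]
      rfl
    · rw [if_neg hneed]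
      by_cases htg : S - m + 1 > S
      · rw [if_pos htg]
        rfl
      · rw [if_neg htg, scanA_eq]
        have hLnil : ((PySem.List.pyRange (S - m + 1) (S + 1) 1).filter
            (fun w => decide (PySem.List.pyGetD dp w 0 < n))) = [] := by
          rw [List.eq_nil_iff_forall_not_mem]
          intro w hw
          obtain ⟨hwr, hcond⟩ := List.mem_filter.mp hw
          simp only [decide_eq_true_eq] at hcond
          obtain ⟨hw1, hw2⟩ := PySem.List.mem_pyRange_one.mp hwr
          have hA1 := (hvalsA w (by omega) (by omega)).1
          rcases hM : M info w with _ | u <;> rw [hM] at hA1 <;> simp only [clampM] at hA1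
          · omega
          · have := M_nonneg info hPre' hM
            omega
        rw [hLnil]
        simp
        rfl
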